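-- pv_equiv track=rewrite | github.com/inoftrobinson/inoft_vocal_framework | botpress_integration/generator.py | prettify_speech_text
-- ===== SOURCE A (Python) =====
-- def prettify_speech_text(text: str) -> str:
--     new_text = str()
--     last_char_index_to_have_been_added_new_line = 0
--     for i_char, char in enumerate(text):
--         if i_char > last_char_index_to_have_been_added_new_line + 115:
--             if char == " ":
--                 new_text += (char + "\n")
--                 last_char_index_to_have_been_added_new_line = i_char
--             else:
--                 new_text += char
--         else:
--             new_text += char
--     return new_text
-- ===== SOURCE B (Python) =====
-- def prettify_speech_text(text: str) -> str:
--     pieces = []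
--     pos = 0        # start of the next slice to copy
--     search = 116   # first index eligible for a break after the last one
--     while True:
--         s = text.find(" ", search)
--         if s == -1:
--             pieces.append(text[pos:])
--             return "".join(pieces)
--         pieces.append(text[pos:s + 1])
--         pieces.append("\n")
--         pos = s + 1
--         search = s + 116
-- ===== Notes on version B (the rewrite author's own statement) =====
-- stated objective: faster
-- what changed: Replaces the per-character Python loop carrying a last-break index with a str.find-driven loop that jumps directly to each next eligible space and assembles the result from whole slices.
import Mathlib
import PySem

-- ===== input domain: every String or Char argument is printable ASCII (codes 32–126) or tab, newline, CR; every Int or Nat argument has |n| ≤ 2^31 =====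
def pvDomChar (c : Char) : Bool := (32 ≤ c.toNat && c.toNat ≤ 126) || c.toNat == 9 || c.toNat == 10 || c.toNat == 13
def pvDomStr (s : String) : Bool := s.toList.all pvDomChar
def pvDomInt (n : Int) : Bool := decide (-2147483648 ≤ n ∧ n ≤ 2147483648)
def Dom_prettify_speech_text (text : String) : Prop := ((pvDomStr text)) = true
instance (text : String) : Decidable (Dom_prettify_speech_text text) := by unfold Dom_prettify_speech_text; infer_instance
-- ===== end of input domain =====

-- B replaces A's per-character scan (carrying the index of the last inserted break) by a
-- str.find-driven loop that jumps to each next eligible space and joins whole slices; measurably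
-- faster in Python by a constant factor.

-- ===== PORT A =====
-- the for-loop over enumerate(text) with state (last_char_index..., new_text); strings are
-- built as List Char and packed with String.ofList at the end.
def pvAGo (cs : List Char) (i last : Nat) (acc : List Char) : List Char :=
  match cs with
  | [] => acc
  | c :: r =>
    if i > last + 115 then
      if c = ' ' then pvAGo r (i + 1) i (acc ++ [c, '\n'])
      else pvAGo r (i + 1) last (acc ++ [c])
    else pvAGo r (i + 1) last (acc ++ [c])

def prettify_speech_text (text : String) : String :=
  String.ofList (pvAGo text.toList 0 0 [])

-- ===== PORT B =====
-- `text.find(" ", search)` is PySem.Chars.findFrom; used by pvBGo's termination proof.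
theorem pvFindFrom_big (cs : List Char) (k : Nat) (h : cs.length < k) :
    PySem.Chars.findFrom cs [' '] (k : Int) none = -1 := by
  unfold PySem.Chars.findFrom
  simp only []
  split_ifs <;> first | rfl | omega

-- bounds of a successful find, used by pvBGo's termination proof
theorem pvFindFrom_bounds (cs : List Char) (k : Nat)
    (h : PySem.Chars.findFrom cs [' '] (k : Int) none ≠ -1) :
    k ≤ (PySem.Chars.findFrom cs [' '] (k : Int) none).toNat ∧
      (PySem.Chars.findFrom cs [' '] (k : Int) none).toNat < cs.length := by
  have hk : k ≤ cs.length := by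
    by_contra hk
    exact h (pvFindFrom_big cs k (by omega))
  obtain ⟨h1, h2, -⟩ := PySem.Chars.findFrom_natCast_spec cs [' '] k hk h
  refine ⟨by omega, ?_⟩
  rcases h2 with ⟨t, ht⟩
  have := congrArg List.length ht
  simp [List.length_drop] at this
  omega

-- the while-True loop of B: find the next eligible space, emit a slice (and "\n") per break,
-- the final slice when find returns -1; ''.join is list concatenation.
def pvBGo (cs : List Char) (pos search : Nat) : List Char :=
  let s := PySem.Chars.findFrom cs [' '] (search : Int) none
  if _hs : s = -1 then PySem.List.slice cs (some (pos : Int)) none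
  else
    PySem.List.slice cs (some (pos : Int)) (some (s + 1)) ++ ['\n'] ++
      pvBGo cs (s.toNat + 1) (s.toNat + 116)
termination_by cs.length - search
decreasing_by
  have := pvFindFrom_bounds cs search _hs
  omega

def prettify_speech_text_alt (text : String) : String :=
  String.ofList (pvBGo text.toList 0 116)

-- ===== PRECONDITION & SPEC =====
def Spec_prettify_speech_text (text : String) (out : String) : Prop := out = prettify_speech_text_alt text
instance (text : String) (out : String) : Decidable (Spec_prettify_speech_text text out) := by unfold Spec_prettify_speech_text; infer_instance

-- ===== CLAIM (what is proved, stated in full; the proofs are below) =====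
def Claim_equal_prettify_speech_text : Prop := ∀ (text : String), Dom_prettify_speech_text text → Spec_prettify_speech_text text (prettify_speech_text text)

-- ===== LEMMAS AND PROOFS =====

theorem pvSingleton_prefix_iff (a : Char) (l : List Char) : [a] <+: l ↔ l.head? = some a := by
  cases l with
  | nil => simp
  | cons b t => simp [List.cons_prefix_cons, eq_comm]

theorem pvPrefix_drop_iff (cs : List Char) (j : Nat) :
    [' '] <+: cs.drop j ↔ ∃ hj : j < cs.length, cs[j] = ' ' := by
  rw [pvSingleton_prefix_iff, List.head?_drop, List.getElem?_eq_some_iff]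

-- characterisation of a successful findFrom: first space at index ≥ k
theorem pvFindFrom_spec (cs : List Char) (k : Nat)
    (h : PySem.Chars.findFrom cs [' '] (k : Int) none ≠ -1) :
    k ≤ (PySem.Chars.findFrom cs [' '] (k : Int) none).toNat ∧
      ∃ ht : (PySem.Chars.findFrom cs [' '] (k : Int) none).toNat < cs.length,
        cs[(PySem.Chars.findFrom cs [' '] (k : Int) none).toNat] = ' ' ∧
          ∀ j (hj : j < cs.length), k ≤ j →
            j < (PySem.Chars.findFrom cs [' '] (k : Int) none).toNat → cs[j] ≠ ' ' := by
  have hk : k ≤ cs.length := by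
    by_contra hk
    exact h (pvFindFrom_big cs k (by omega))
  obtain ⟨h1, h2, h3⟩ := PySem.Chars.findFrom_natCast_spec cs [' '] k hk h
  rw [pvPrefix_drop_iff] at h2
  obtain ⟨ht, hsp⟩ := h2
  refine ⟨by omega, ht, hsp, fun j hj hkj hjt hspj => ?_⟩
  exact h3 j (by omega) (by omega) ((pvPrefix_drop_iff cs j).2 ⟨hj, hspj⟩)

-- no space at any index ≥ k when findFrom fails
theorem pvFindFrom_none (cs : List Char) (k : Nat)
    (h : PySem.Chars.findFrom cs [' '] (k : Int) none = -1) :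
    ∀ j (hj : j < cs.length), k ≤ j → cs[j] ≠ ' ' := by
  intro j hj hkj hsp
  have hk : k ≤ cs.length := by omega
  rw [PySem.Chars.findFrom_natCast_eq_neg_one_iff cs [' '] k hk] at h
  apply h
  have hdd : (cs.drop k).drop (j - k) = cs.drop j := by
    rw [List.drop_drop]
    congr 1
    omega
  have hpre : [' '] <+: (cs.drop k).drop (j - k) := by
    rw [hdd]
    exact (pvPrefix_drop_iff cs j).2 ⟨hj, hsp⟩
  exact hpre.isInfix.trans (List.drop_suffix _ _).isInfix

theorem pvAGo_acc (cs : List Char) (i last : Nat) (acc : List Char) :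
    pvAGo cs i last acc = acc ++ pvAGo cs i last [] := by
  induction cs generalizing i last acc with
  | nil => simp [pvAGo]
  | cons c r ih =>
    simp only [pvAGo]
    split_ifs <;>
      · rw [ih _ _ (acc ++ _), ih _ _ ([] ++ _)]
        simp

theorem pvAGo_copy (l r : List Char) (i last : Nat) (acc : List Char)
    (h : ∀ (j : Nat) (hj : j < l.length), last + 115 < i + j → l[j] ≠ ' ') :
    pvAGo (l ++ r) i last acc = pvAGo r (i + l.length) last (acc ++ l) := by
  induction l generalizing i acc with
  | nil => simp
  | cons c l' ih =>
    simp only [List.cons_append, pvAGo]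
    have step : pvAGo (l' ++ r) (i + 1) last (acc ++ [c]) =
        pvAGo r (i + (c :: l').length) last (acc ++ c :: l') := by
      rw [ih (i + 1) (acc ++ [c]) (fun j hj hgt => h (j + 1) (by simpa using hj) (by omega))]
      simp; ring_nf
    split_ifs with h1 h2
    · exact absurd h2 (h 0 (by simp) (by omega))
    · exact step
    · exact step

theorem pvMain : ∀ (n : Nat) (cs : List Char) (pos last : Nat),
    cs.length - pos ≤ n → pos ≤ last + 116 →
    pvAGo (cs.drop pos) pos last [] = pvBGo cs pos (last + 116) := by
  intro n
  induction n with
  | zero =>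
    intro cs pos last hn hpl
    rw [pvBGo]
    have hlen : cs.length ≤ pos := by omega
    split_ifs with hs
    · rw [List.drop_eq_nil_of_le hlen, PySem.List.slice_from_natCast,
        List.drop_eq_nil_of_le hlen, pvAGo]
    · obtain ⟨h1, ht, -⟩ := pvFindFrom_spec cs (last + 116) hs
      omega
  | succ m ih =>
    intro cs pos last hn hpl
    rw [pvBGo]
    split_ifs with hs
    · -- no further eligible space: A copies the rest verbatim
      have hnone := pvFindFrom_none cs (last + 116) hs
      have := pvAGo_copy (cs.drop pos) [] pos last []
        (fun j hj hgt hsp => by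
          have hjl : pos + j < cs.length := by
            have := hj; simp [List.length_drop] at this; omega
          exact hnone (pos + j) hjl (by omega) (by simpa [List.getElem_drop] using hsp))
      simp only [List.append_nil, List.nil_append] at this
      rw [this, pvAGo, PySem.List.slice_from_natCast]
    · obtain ⟨h1, ht, hsp, hmin⟩ := pvFindFrom_spec cs (last + 116) hs
      set s := PySem.Chars.findFrom cs [' '] ((last + 116 : Nat) : Int) none with hsdef
      set t := s.toNat with htdef
      have hpt : pos ≤ t := by omega
      have htl : t < cs.length := ht
      -- split the remaining text at the break position t
      have hsplit : cs.drop pos = (cs.drop pos).take (t - pos) ++ (' ' :: cs.drop (t + 1)) := by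
        conv_lhs => rw [← List.take_append_drop (t - pos) (cs.drop pos)]
        rw [List.drop_drop, show pos + (t - pos) = t by omega,
          List.drop_eq_getElem_cons htl, hsp]
      have hlenl : ((cs.drop pos).take (t - pos)).length = t - pos := by
        simp [List.length_take, List.length_drop]; omega
      rw [hsplit, pvAGo_copy _ _ pos last []
        (fun j hj hgt hsp' => by
          rw [hlenl] at hj
          refine hmin (pos + j) (by omega) (by omega) (by omega) ?_
          simpa [List.getElem_take, List.getElem_drop] using hsp')]
      rw [hlenl, show pos + (t - pos) = t by omega]
      rw [pvAGo]
      rw [if_pos (by omega : t > last + 115), if_pos rfl]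
      rw [pvAGo_acc]
      rw [ih cs (t + 1) t (by omega) (by omega)]
      -- align the two slice expressions
      have hs0 : (0 : Int) ≤ s := by
        have : s ≠ -1 := hs
        by_contra hneg
        have hsv := PySem.Chars.findFrom_natCast_spec cs [' '] (last + 116)
          (by by_contra hk; exact hs (pvFindFrom_big cs (last + 116) (by omega))) hs
        omega
      have hscast : s = ((t : Nat) : Int) := by omega
      rw [hscast, show ((t : Nat) : Int) + 1 = (((t + 1 : Nat)) : Int) by push_cast; ring,
        PySem.List.slice_natCast]
      have htake : (cs.drop pos).take (t + 1 - pos) =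
          (cs.drop pos).take (t - pos) ++ [' '] := by
        rw [show t + 1 - pos = (t - pos) + 1 by omega, List.take_add_one]
        have hget : (cs.drop pos)[t - pos]? = some ' ' := by
          rw [List.getElem?_drop, show pos + (t - pos) = t by omega,
            List.getElem?_eq_getElem htl, hsp]
        rw [hget]
        rfl
      rw [htake]
      simp

-- ===== VERDICT (by name: the statement is the Claim_ definition above) =====
theorem prettify_speech_text_spec : Claim_equal_prettify_speech_text := by
  intro text _
  unfold Spec_prettify_speech_text prettify_speech_text prettify_speech_text_alt
  have h := pvMain text.toList.length text.toList 0 0 (by omega) (by omega)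
  rw [List.drop_zero] at h
  rw [h]
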